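-- pv_equiv track=rewrite | github.com/tocomon/algorithm | week02/8983.py | count_animals
-- ===== SOURCE A (Python) =====
-- def count_animals(x_pos, y_pos, hunters, L):
--     count = 0
--     for x, y in zip(x_pos, y_pos):
--         left = 0
--         right = len(hunters) - 1
--         while left <= right:
--             mid = (left + right) // 2
--             if abs(hunters[mid] - x) + y <= L:
--                 count += 1
--                 break
--             elif hunters[mid] > x:
--                 if mid == left:
--                     break
--                 right = mid - 1
--             else:
--                 if mid == right:
--                     break
--                 left = mid + 1
--     return count
-- ===== SOURCE B (Python) =====
-- def count_animals(x_pos, y_pos, hunters, L):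
--     n = len(hunters)
--
--     def path(x, lo, hi):
--         # hunter values A's binary search would probe for abscissa x (the probe
--         # path depends only on x, never on the hit test that makes A break early)
--         if lo > hi:
--             return []
--         mid = (lo + hi) // 2
--         h = hunters[mid]
--         rest = path(x, lo, mid - 1) if h > x else path(x, mid + 1, hi)
--         return [h] + rest
--
--     count = 0
--     for x, y in zip(x_pos, y_pos):
--         if any(abs(h - x) + y <= L for h in path(x, 0, n - 1)):
--             count += 1
--     return count
-- ===== Notes on version B (the rewrite author's own statement) =====
-- stated objective: alternative
-- what changed: Instead of A's stateful break/continue binary-search loop that fuses probing with the hit test, B first materialises per animal the list of hunter values the search would probe (a pure divide-and-conquer path function independent of y and L) and then counts the animal iff any probed value satisfies |h-x|+y<=L; correctness rests on the probe path being independent of the hit test that makes A break early.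
import Mathlib
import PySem

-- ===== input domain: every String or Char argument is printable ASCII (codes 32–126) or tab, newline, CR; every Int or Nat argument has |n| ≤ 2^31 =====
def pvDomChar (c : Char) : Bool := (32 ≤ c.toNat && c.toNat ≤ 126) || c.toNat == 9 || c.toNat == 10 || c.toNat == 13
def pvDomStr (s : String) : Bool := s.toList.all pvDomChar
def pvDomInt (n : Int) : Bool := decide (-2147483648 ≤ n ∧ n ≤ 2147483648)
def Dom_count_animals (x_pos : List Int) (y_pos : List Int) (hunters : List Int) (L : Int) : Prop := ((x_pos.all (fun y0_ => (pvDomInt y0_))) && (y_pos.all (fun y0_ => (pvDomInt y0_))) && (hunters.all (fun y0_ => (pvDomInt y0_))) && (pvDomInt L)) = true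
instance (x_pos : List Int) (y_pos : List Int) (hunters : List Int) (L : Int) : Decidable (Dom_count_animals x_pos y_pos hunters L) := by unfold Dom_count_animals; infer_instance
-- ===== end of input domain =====

-- B replaces A's stateful break/continue binary-search loop by a pure probe-path list
-- (the hunter values the search would visit) plus an `any` scan; returns agree on every input.
-- ===== PORT A =====
-- inner `while left <= right` loop of A, carrying (left, right, count); the Nat fuel only
-- makes the same computation total (hunters.length + 1 always suffices, proved below)
def countALoop (hunters : List Int) (L x y : Int) : Nat → Int → Int → Int → Int
  | 0, _, _, count => count
  | fuel + 1, left, right, count =>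
    if left ≤ right then
      let mid := PySem.Int.floordiv (left + right) 2
      let hm := PySem.List.pyGetD hunters mid 0   -- hunters[mid]; mid is always in range when called as A calls it
      if |hm - x| + y ≤ L then count + 1
      else if hm > x then
        if mid = left then count
        else countALoop hunters L x y fuel left (mid - 1) count
      else
        if mid = right then count
        else countALoop hunters L x y fuel (mid + 1) right count
    else count

def count_animals (x_pos : List Int) (y_pos : List Int) (hunters : List Int) (L : Int) : Int :=
  (x_pos.zip y_pos).foldl
    (fun count p =>
      countALoop hunters L p.1 p.2 (hunters.length + 1) 0 ((hunters.length : Int) - 1) count) 0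

-- ===== PORT B =====
-- recursive helper path(x, lo, hi) from Source B: the hunter values the search probes for x;
-- the Nat fuel only makes the same computation total (hunters.length + 1 always suffices)
def pathB (hunters : List Int) (x : Int) : Nat → Int → Int → List Int
  | 0, _, _ => []
  | fuel + 1, lo, hi =>
    if lo > hi then []
    else
      let mid := PySem.Int.floordiv (lo + hi) 2
      let h := PySem.List.pyGetD hunters mid 0   -- hunters[mid]; in range when called as Source B calls it
      let rest := if h > x then pathB hunters x fuel lo (mid - 1) else pathB hunters x fuel (mid + 1) hi
      [h] ++ rest

def count_animals_alt (x_pos : List Int) (y_pos : List Int) (hunters : List Int) (L : Int) : Int :=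
  (x_pos.zip y_pos).foldl
    (fun count p =>
      if (pathB hunters p.1 (hunters.length + 1) 0 ((hunters.length : Int) - 1)).any
           (fun h => decide (|h - p.1| + p.2 ≤ L))
      then count + 1 else count) 0

-- ===== PRECONDITION & SPEC =====
def Spec_count_animals (x_pos : List Int) (y_pos : List Int) (hunters : List Int) (L : Int) (out : Int) : Prop := out = count_animals_alt x_pos y_pos hunters L
instance (x_pos : List Int) (y_pos : List Int) (hunters : List Int) (L : Int) (out : Int) : Decidable (Spec_count_animals x_pos y_pos hunters L out) := by unfold Spec_count_animals; infer_instance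

-- ===== CLAIM (what is proved, stated in full; the proofs are below) =====
def Claim_equal_count_animals : Prop := ∀ (x_pos : List Int) (y_pos : List Int) (hunters : List Int) (L : Int), Dom_count_animals x_pos y_pos hunters L → Spec_count_animals x_pos y_pos hunters L (count_animals x_pos y_pos hunters L)

-- ===== LEMMAS AND PROOFS =====

-- with enough fuel, A's inner loop adds 1 exactly when some probed value on B's path hits
lemma countALoop_eq_any (hunters : List Int) (L x y : Int) :
    ∀ (fuel : Nat) (l r c : Int), (r + 1 - l).toNat < fuel →
      countALoop hunters L x y fuel l r c
        = c + (if (pathB hunters x fuel l r).any (fun h => decide (|h - x| + y ≤ L)) then 1 else 0) := by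
  intro fuel
  induction fuel with
  | zero => intro l r c hn; omega
  | succ n ih =>
    intro l r c hn
    by_cases hlr : l ≤ r
    · have hb : l ≤ (l + r) / 2 ∧ (l + r) / 2 ≤ r := by
        rw [← PySem.Int.floordiv_eq_ediv_of_pos (by norm_num : (0:Int) < 2)]
        exact PySem.Int.floordiv_two_mid_bounds hlr
      rw [countALoop, pathB, if_pos hlr, if_neg (by omega : ¬ l > r)]
      dsimp only
      rw [PySem.Int.floordiv_eq_ediv_of_pos (by norm_num : (0:Int) < 2)]
      simp only [List.cons_append, List.nil_append, List.any_cons]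
      by_cases hhit : |PySem.List.pyGetD hunters ((l + r) / 2) 0 - x| + y ≤ L
      · rw [if_pos hhit]
        simp only [decide_eq_true hhit, Bool.true_or]
        norm_num
      · rw [if_neg hhit]
        simp only [decide_eq_false hhit, Bool.false_or]
        by_cases hgt : PySem.List.pyGetD hunters ((l + r) / 2) 0 > x
        · simp only [if_pos hgt]
          by_cases hml : (l + r) / 2 = l
          · rw [if_pos hml]
            have hemp : pathB hunters x n l ((l + r) / 2 - 1) = [] := by
              cases n with
              | zero => rw [pathB]
              | succ m => rw [pathB, if_pos (by omega : l > (l + r) / 2 - 1)]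
            rw [hemp]
            simp only [List.any_nil, Bool.false_eq_true, if_false, add_zero]
          · rw [if_neg hml]
            exact ih l ((l + r) / 2 - 1) c (by omega)
        · simp only [if_neg hgt]
          by_cases hmr : (l + r) / 2 = r
          · rw [if_pos hmr]
            have hemp : pathB hunters x n ((l + r) / 2 + 1) r = [] := by
              cases n with
              | zero => rw [pathB]
              | succ m => rw [pathB, if_pos (by omega : (l + r) / 2 + 1 > r)]
            rw [hemp]
            simp only [List.any_nil, Bool.false_eq_true, if_false, add_zero]
          · rw [if_neg hmr]
            exact ih ((l + r) / 2 + 1) r c (by omega)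
    · rw [countALoop, pathB, if_neg hlr, if_pos (by omega : l > r)]
      simp only [List.any_nil, Bool.false_eq_true, if_false, add_zero]

-- ===== VERDICT (by name: the statement is the Claim_ definition above) =====
theorem count_animals_spec : Claim_equal_count_animals := by
  intro x_pos y_pos hunters L _
  unfold Spec_count_animals count_animals count_animals_alt
  have hfun : (fun (count : Int) (p : Int × Int) =>
        countALoop hunters L p.1 p.2 (hunters.length + 1) 0 ((hunters.length : Int) - 1) count)
      = (fun (count : Int) (p : Int × Int) =>
        if (pathB hunters p.1 (hunters.length + 1) 0 ((hunters.length : Int) - 1)).any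
             (fun h => decide (|h - p.1| + p.2 ≤ L))
        then count + 1 else count) := by
    funext c p
    rw [countALoop_eq_any hunters L p.1 p.2 (hunters.length + 1) 0 ((hunters.length : Int) - 1) c
      (by omega)]
    split <;> omega
  rw [hfun]
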